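-- pv_equiv track=rewrite | github.com/Pallavi-kr6/Early-Warning-Systems | validation.py | validate_heatwave_inputs
-- ===== SOURCE A (Python) =====
-- def validate_heatwave_inputs(max_temp, min_temp, humidity, wind_speed):
--     """Validate heatwave inputs and check logical consistency"""
--     # Check ranges
--     if not (20 <= max_temp <= 55):
--         return False, "Max temperature must be between 20 and 55°C"
--     if not (10 <= min_temp <= 40):
--         return False, "Min temperature must be between 10 and 40°C"
--     if not (0 <= humidity <= 100):
--         return False, "Humidity must be between 0 and 100%"
--     if not (0 <= wind_speed <= 30):
--         return False, "Wind speed must be between 0 and 30 km/h"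
--
--     # Check negative values
--     if any(val < 0 for val in [max_temp, min_temp, humidity, wind_speed]):
--         return False, "All values must be non-negative"
--
--     # Logical inconsistencies
--     if min_temp > max_temp:
--         return False, "Min temperature cannot be higher than max temperature"
--     if max_temp < 25 and humidity > 80:
--         return False, "Low temperatures with very high humidity are unusual"
--     if max_temp > 45 and humidity < 5:
--         return False, "Very high temperatures with very low humidity are unusual"
--
--     return True, ""
-- ===== SOURCE B (Python) =====
-- def validate_heatwave_inputs(max_temp, min_temp, humidity, wind_speed):
--     """Validate heatwave inputs: data-driven range spec + collected violations."""
--     spec = [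
--         ("Max temperature", max_temp, 20, 55, "\u00b0C"),
--         ("Min temperature", min_temp, 10, 40, "\u00b0C"),
--         ("Humidity", humidity, 0, 100, "%"),
--         ("Wind speed", wind_speed, 0, 30, " km/h"),
--     ]
--     errors = ["%s must be between %d and %d%s" % (name, lo, hi, unit)
--               for name, val, lo, hi, unit in spec if not lo <= val <= hi]
--     consistency = [
--         (min_temp > max_temp, "Min temperature cannot be higher than max temperature"),
--         (max_temp < 25 and humidity > 80, "Low temperatures with very high humidity are unusual"),
--         (max_temp > 45 and humidity < 5, "Very high temperatures with very low humidity are unusual"),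
--     ]
--     errors += [msg for bad, msg in consistency if bad]
--     return (not errors, errors[0] if errors else "")
-- ===== Notes on version B (the rewrite author's own statement) =====
-- stated objective: alternative
-- what changed: Replaces A's early-return guard chain (with its unreachable negative-value guard) by a data-driven validator: range messages are generated by formatting from a (name, value, lo, hi, unit) spec table, all violations are collected eagerly into a list, and the verdict is (no violations, first violation or '').
import Mathlib
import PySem

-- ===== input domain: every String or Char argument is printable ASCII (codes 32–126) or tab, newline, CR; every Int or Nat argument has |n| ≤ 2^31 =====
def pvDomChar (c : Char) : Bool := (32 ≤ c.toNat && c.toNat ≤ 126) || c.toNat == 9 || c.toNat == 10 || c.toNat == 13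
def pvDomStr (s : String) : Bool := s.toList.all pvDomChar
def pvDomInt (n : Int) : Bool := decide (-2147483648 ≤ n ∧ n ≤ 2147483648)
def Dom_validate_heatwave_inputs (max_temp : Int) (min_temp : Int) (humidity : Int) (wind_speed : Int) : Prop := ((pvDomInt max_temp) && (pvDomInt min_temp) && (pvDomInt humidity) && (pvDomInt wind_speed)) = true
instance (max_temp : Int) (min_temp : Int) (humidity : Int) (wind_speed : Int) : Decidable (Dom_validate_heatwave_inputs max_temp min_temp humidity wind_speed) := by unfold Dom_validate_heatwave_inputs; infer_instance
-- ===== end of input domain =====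

-- B replaces A's guard chain with a data-driven validator: formatted range messages from a spec table, all violations collected, verdict = (no violations, first violation or ""); same result, no speed claim.


-- ===== PORT A =====
-- Literal transliteration of A: chain of guards in the original order.
def validate_heatwave_inputs (max_temp : Int) (min_temp : Int) (humidity : Int) (wind_speed : Int) : Bool × String :=
  if ¬ (20 ≤ max_temp ∧ max_temp ≤ 55) then (false, "Max temperature must be between 20 and 55°C")
  else if ¬ (10 ≤ min_temp ∧ min_temp ≤ 40) then (false, "Min temperature must be between 10 and 40°C")
  else if ¬ (0 ≤ humidity ∧ humidity ≤ 100) then (false, "Humidity must be between 0 and 100%")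
  else if ¬ (0 ≤ wind_speed ∧ wind_speed ≤ 30) then (false, "Wind speed must be between 0 and 30 km/h")
  else if [max_temp, min_temp, humidity, wind_speed].any (fun val => val < 0) then (false, "All values must be non-negative")
  else if min_temp > max_temp then (false, "Min temperature cannot be higher than max temperature")
  else if max_temp < 25 ∧ humidity > 80 then (false, "Low temperatures with very high humidity are unusual")
  else if max_temp > 45 ∧ humidity < 5 then (false, "Very high temperatures with very low humidity are unusual")
  else (true, "")

-- ===== PORT B =====
-- "%s must be between %d and %d%s" % (name, lo, hi, unit); exact: ints rendered by PySem.Int.toStr, plain concatenation.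
def pvRangeMsg (name : String) (lo : Int) (hi : Int) (unit : String) : String :=
  name ++ " must be between " ++ PySem.Int.toStr lo ++ " and " ++ PySem.Int.toStr hi ++ unit

-- the range-message comprehension over the spec table
def pvRangeErrors : List (String × Int × Int × Int × String) → List String
  | [] => []
  | (name, val, lo, hi, unit) :: rest =>
      if ¬ (lo ≤ val ∧ val ≤ hi) then pvRangeMsg name lo hi unit :: pvRangeErrors rest
      else pvRangeErrors rest

-- the consistency-message comprehension: messages whose flag is set
def pvFlagged : List (Bool × String) → List String
  | [] => []
  | (bad, msg) :: rest => if bad then msg :: pvFlagged rest else pvFlagged rest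

-- B: spec-table-driven collection of all violations; verdict is (no violations, first violation or "").
def validate_heatwave_inputs_alt (max_temp : Int) (min_temp : Int) (humidity : Int) (wind_speed : Int) : Bool × String :=
  let spec : List (String × Int × Int × Int × String) :=
    [ ("Max temperature", max_temp, 20, 55, "°C"),
      ("Min temperature", min_temp, 10, 40, "°C"),
      ("Humidity", humidity, 0, 100, "%"),
      ("Wind speed", wind_speed, 0, 30, " km/h") ]
  let consistency : List (Bool × String) :=
    [ (decide (min_temp > max_temp), "Min temperature cannot be higher than max temperature"),
      (decide (max_temp < 25 ∧ humidity > 80), "Low temperatures with very high humidity are unusual"),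
      (decide (max_temp > 45 ∧ humidity < 5), "Very high temperatures with very low humidity are unusual") ]
  let errors := pvRangeErrors spec ++ pvFlagged consistency
  (errors.isEmpty, errors.headD "")

-- ===== PRECONDITION & SPEC =====
def Spec_validate_heatwave_inputs (max_temp : Int) (min_temp : Int) (humidity : Int) (wind_speed : Int) (out : Bool × String) : Prop := out = validate_heatwave_inputs_alt max_temp min_temp humidity wind_speed
instance (max_temp : Int) (min_temp : Int) (humidity : Int) (wind_speed : Int) (out : Bool × String) : Decidable (Spec_validate_heatwave_inputs max_temp min_temp humidity wind_speed out) := by unfold Spec_validate_heatwave_inputs; infer_instance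

-- ===== CLAIM (what is proved, stated in full; the proofs are below) =====
def Claim_equal_validate_heatwave_inputs : Prop := ∀ (max_temp : Int) (min_temp : Int) (humidity : Int) (wind_speed : Int), Dom_validate_heatwave_inputs max_temp min_temp humidity wind_speed → Spec_validate_heatwave_inputs max_temp min_temp humidity wind_speed (validate_heatwave_inputs max_temp min_temp humidity wind_speed)

-- ===== LEMMAS AND PROOFS =====

-- ===== VERDICT (by name: the statement is the Claim_ definition above) =====
theorem validate_heatwave_inputs_spec : Claim_equal_validate_heatwave_inputs := by
  intro max_temp min_temp humidity wind_speed _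
  unfold Spec_validate_heatwave_inputs validate_heatwave_inputs validate_heatwave_inputs_alt
  simp only [pvRangeErrors, pvFlagged, pvRangeMsg, List.any, decide_eq_true_eq, Bool.or_eq_true]
  split_ifs
  all_goals first
    | rfl
    | omega
    | (simp_all [List.isEmpty, List.headD]; omega)
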